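-- pv_equiv track=rewrite | github.com/daniel1mor3055/real-estate-investing | mcp_server/mcp_ticket_server.py | append_to_section
-- ===== SOURCE A (Python) =====
-- def append_to_section(content: str, section_name: str, new_content: str) -> str:
--     """Append content to a section."""
--     lines = content.split('\n')
--     for i, line in enumerate(lines):
--         if line.startswith(f"## {section_name}"):
--             # Find the next section or end
--             j = i + 1
--             while j < len(lines) and not lines[j].startswith("## ") and not lines[j].startswith("---"):
--                 j += 1
--             # Insert before the next section
--             lines.insert(j, new_content)
--             break
--
--     return '\n'.join(lines)
-- ===== SOURCE B (Python) =====
-- def append_to_section(content: str, section_name: str, new_content: str) -> str: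
--     """Append content to a section (single linear pass with a small state machine)."""
--     result = []
--     active = False
--     done = False
--     for line in content.split('\n'):
--         if active and (line.startswith('## ') or line.startswith('---')):
--             result.append(new_content)
--             active = False
--             done = True
--         elif not done and not active and line.startswith('## ' + section_name):
--             active = True
--         result.append(line)
--     if active:
--         result.append(new_content)
--     return '\n'.join(result)
-- ===== Notes on version B (the rewrite author's own statement) =====
-- stated objective: alternative
-- what changed: A scans for the header with enumerate, runs a second inner while-loop to find the section boundary, then mutates the list with insert; B is a single linear pass with a two-flag state machine (active/done) that emits lines and splices new_content in as it goes.
import Mathlib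
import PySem

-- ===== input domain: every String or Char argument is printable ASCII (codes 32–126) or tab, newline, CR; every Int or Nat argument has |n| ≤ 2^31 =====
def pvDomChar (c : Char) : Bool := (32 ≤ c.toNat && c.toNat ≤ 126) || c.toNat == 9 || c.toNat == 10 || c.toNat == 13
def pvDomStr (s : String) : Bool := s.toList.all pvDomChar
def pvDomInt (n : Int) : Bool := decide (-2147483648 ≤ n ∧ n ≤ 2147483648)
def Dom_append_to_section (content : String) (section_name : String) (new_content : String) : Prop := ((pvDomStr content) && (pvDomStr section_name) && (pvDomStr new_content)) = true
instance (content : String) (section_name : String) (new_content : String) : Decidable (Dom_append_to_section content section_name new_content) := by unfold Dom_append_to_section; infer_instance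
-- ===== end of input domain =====

-- B replaces A's find-then-inner-scan-then-insert with a single linear pass driven by a
-- two-flag state machine (objective: alternative decomposition, same cost).

-- ===== PORT A =====
-- the 'while j < len(lines) and not ... : j += 1' loop
def aScan (lines : List String) (j : Nat) : Nat :=
  if h : j < lines.length then
    if !(PySem.Str.startswith lines[j] "## ") && !(PySem.Str.startswith lines[j] "---") then
      aScan lines (j + 1)
    else j
  else j
termination_by lines.length - j
decreasing_by omega

-- the 'for i, line in enumerate(lines): if line.startswith(pref): ... break' search
def aFind (lines : List String) (pref : String) (i : Nat) : Option Nat :=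
  match lines with
  | [] => none
  | l :: ls => if PySem.Str.startswith l pref then some i else aFind ls pref (i + 1)

def append_to_section (content : String) (section_name : String) (new_content : String) : String :=
  let lines := (PySem.Str.split? content "\n").getD []
  let lines' :=
    match aFind lines ("## " ++ section_name) 0 with
    | some i => PySem.List.insert lines ((aScan lines (i + 1) : Nat) : Int) new_content
    | none => lines
  PySem.Str.join "\n" lines'

-- ===== PORT B =====
def bBound (l : String) : Bool :=
  PySem.Str.startswith l "## " || PySem.Str.startswith l "---"

-- the single for-loop of Source B: the returned list is built as the loop runs, 'active'/'done' are the two flags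
def bLoop (pref nc : String) : List String → Bool → Bool → List String
  | [], active, _ => if active then [nc] else []
  | l :: ls, active, done =>
    if active && bBound l then nc :: l :: bLoop pref nc ls false true
    else if !done && !active && PySem.Str.startswith l pref then l :: bLoop pref nc ls true done
    else l :: bLoop pref nc ls active done

def append_to_section_alt (content : String) (section_name : String) (new_content : String) : String :=
  PySem.Str.join "\n"
    (bLoop ("## " ++ section_name) new_content ((PySem.Str.split? content "\n").getD []) false false)

-- ===== PRECONDITION & SPEC =====
def Spec_append_to_section (content : String) (section_name : String) (new_content : String) (out : String) : Prop := out = append_to_section_alt content section_name new_content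
instance (content : String) (section_name : String) (new_content : String) (out : String) : Decidable (Spec_append_to_section content section_name new_content out) := by unfold Spec_append_to_section; infer_instance

-- ===== CLAIM (what is proved, stated in full; the proofs are below) =====
def Claim_equal_append_to_section : Prop := ∀ (content : String) (section_name : String) (new_content : String), Dom_append_to_section content section_name new_content → Spec_append_to_section content section_name new_content (append_to_section content section_name new_content)

-- ===== LEMMAS AND PROOFS =====

theorem aScan_eq (lines : List String) (j : Nat) (hj : j ≤ lines.length) :
    aScan lines j = j + (lines.drop j).findIdx bBound := by
  fun_induction aScan lines j with
  | case1 j h hc ih =>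
      rw [List.drop_eq_getElem_cons h, List.findIdx_cons]
      simp only [Bool.and_eq_true, Bool.not_eq_true'] at hc
      have hb : bBound lines[j] = false := by
        unfold bBound; rw [hc.1, hc.2]; rfl
      rw [hb]
      simp only [cond_false]
      rw [ih (by omega)]
      omega
  | case2 j h hc =>
      simp only [Bool.and_eq_true, Bool.not_eq_true'] at hc
      have hb : bBound lines[j] = true := by
        unfold bBound
        cases hs1 : PySem.Str.startswith lines[j] "## " with
        | true => rfl
        | false =>
            cases hs2 : PySem.Str.startswith lines[j] "---" with
            | true => rfl
            | false => exact absurd ⟨hs1, hs2⟩ hc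
      rw [List.drop_eq_getElem_cons h, List.findIdx_cons, hb]
      simp
  | case3 j h =>
      have : j = lines.length := by omega
      subst this
      simp

theorem bLoop_done (pref nc : String) (ls : List String) :
    bLoop pref nc ls false true = ls := by
  induction ls with
  | nil => simp [bLoop]
  | cons l ls ih => simp [bLoop, ih]

theorem bLoop_active (pref nc : String) (ls : List String) (d : Bool) :
    bLoop pref nc ls true d =
      ls.take (ls.findIdx bBound) ++ nc :: ls.drop (ls.findIdx bBound) := by
  induction ls generalizing d with
  | nil => simp [bLoop]
  | cons l ls ih =>
      cases hb : bBound l with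
      | true => simp [bLoop, hb, List.findIdx_cons, bLoop_done]
      | false => simp [bLoop, hb, List.findIdx_cons, ih]

theorem bLoop_prefix (pref nc : String) (pre rest : List String)
    (h : ∀ x ∈ pre, PySem.Str.startswith x pref = false) :
    bLoop pref nc (pre ++ rest) false false = pre ++ bLoop pref nc rest false false := by
  induction pre with
  | nil => simp
  | cons p ps ih =>
      have hp : PySem.Chars.startswith p.toList pref.toList = false := by
        rw [← PySem.Str.startswith_eq]; exact h p (by simp)
      rw [List.cons_append]
      show bLoop pref nc (p :: (ps ++ rest)) false false = _
      simp only [bLoop, Bool.false_and, Bool.not_false, Bool.true_and, Bool.and_true]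
      rw [List.cons_append]
      simp [hp]
      exact ih (fun x hx => h x (by simp [hx]))

theorem aFind_none (ls : List String) (pref : String) (i : Nat)
    (h : aFind ls pref i = none) : ∀ l ∈ ls, PySem.Str.startswith l pref = false := by
  induction ls generalizing i with
  | nil => simp
  | cons l ls ih =>
      intro x hx
      unfold aFind at h
      cases hl : PySem.Str.startswith l pref with
      | true => rw [hl] at h; simp at h
      | false =>
          rw [hl] at h
          simp only [Bool.false_eq_true, if_false] at h
          rcases List.mem_cons.mp hx with rfl | hx'
          · exact hl
          · exact ih (i + 1) h x hx'

theorem aFind_some (ls : List String) (pref : String) (i k : Nat)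
    (h : aFind ls pref i = some k) :
    ∃ pre l post, ls = pre ++ l :: post ∧ i + pre.length = k ∧
      (∀ x ∈ pre, PySem.Str.startswith x pref = false) ∧
      PySem.Str.startswith l pref = true := by
  induction ls generalizing i with
  | nil => simp [aFind] at h
  | cons l ls ih =>
      unfold aFind at h
      cases hl : PySem.Str.startswith l pref with
      | true =>
          rw [hl] at h
          simp only [if_true] at h
          have h' : i = k := by simpa using h
          exact ⟨[], l, ls, by simp, by simpa using h', by simp, hl⟩
      | false =>
          rw [hl] at h
          simp only [Bool.false_eq_true, if_false] at h
          obtain ⟨pre, m, post, hls, hk, hpre, hm⟩ := ih (i + 1) h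
          exact ⟨l :: pre, m, post, by simp [hls], by simp; omega,
            fun x hx => by rcases List.mem_cons.mp hx with rfl | hx' <;>
              [exact hl; exact hpre x hx'], hm⟩

-- ===== VERDICT (by name: the statement is the Claim_ definition above) =====
theorem append_to_section_spec : Claim_equal_append_to_section := by
  intro content section_name new_content _
  unfold Spec_append_to_section
  simp only [append_to_section, append_to_section_alt]
  set lines := (PySem.Str.split? content "\n").getD [] with hl
  set pref := "## " ++ section_name with hp
  congr 1
  cases hf : aFind lines pref 0 with
  | none =>
      have h := aFind_none lines pref 0 hf
      have h2 := bLoop_prefix pref new_content lines [] h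
      simp only [List.append_nil] at h2
      rw [h2]
      simp [bLoop]
  | some k =>
      obtain ⟨pre, l, post, hls, hk, hpre, hlm⟩ := aFind_some lines pref 0 k hf
      simp only [Nat.zero_add] at hk
      subst hk
      have hlen : lines.length = pre.length + 1 + post.length := by simp [hls]; omega
      have hdrop : lines.drop (pre.length + 1) = post := by
        rw [hls, List.drop_append]
        simp
      have hscan : aScan lines (pre.length + 1) =
          pre.length + 1 + post.findIdx bBound := by
        rw [aScan_eq lines (pre.length + 1) (by omega), hdrop]
      set fb := post.findIdx bBound with hfb
      have hfble : fb ≤ post.length := List.findIdx_le_length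
      show PySem.List.insert lines ((aScan lines (pre.length + 1) : Nat) : Int) new_content =
        bLoop pref new_content lines false false
      rw [hscan, PySem.List.insert_natCast lines (pre.length + 1 + fb) new_content (by omega)]
      have htake : lines.take (pre.length + 1 + fb) = pre ++ l :: post.take fb := by
        rw [hls, List.take_append, List.take_of_length_le (by omega : pre.length ≤ pre.length + 1 + fb),
          show pre.length + 1 + fb - pre.length = fb + 1 by omega, List.take_succ_cons]
      have hdrop2 : lines.drop (pre.length + 1 + fb) = post.drop fb := by
        rw [hls, List.drop_append, List.drop_eq_nil_of_le (by omega : pre.length ≤ pre.length + 1 + fb),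
          show pre.length + 1 + fb - pre.length = fb + 1 by omega, List.drop_succ_cons]
        simp
      rw [htake, hdrop2, hls, bLoop_prefix pref new_content pre (l :: post) hpre]
      have hlm' : PySem.Chars.startswith l.toList pref.toList = true := by
        rw [← PySem.Str.startswith_eq]; exact hlm
      show _ = pre ++ bLoop pref new_content (l :: post) false false
      simp only [bLoop, Bool.false_and, Bool.not_false, Bool.true_and, Bool.and_true]
      simp only [PySem.Str.startswith_eq, hlm', Bool.false_eq_true, if_false, if_true]
      rw [bLoop_active pref new_content post false, ← hfb]
      simp
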